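-- pv_equiv track=rewrite | github.com/VedeshB/Patient-Sentiment-and-Adverse-Effect-Analysis | main/webapp.py | filter_word
-- ===== SOURCE A (Python) =====
-- import string
--
-- def filter_word(n):
--     res = []
--     for i in [n]:
--         t, st = [], ''
--         for j in i:
--             if j in string.punctuation or j.isspace():
--                 if not st.strip().isspace():
--                     t.append(st.strip())
--                 st = ''
--             else:
--                 st += j
--         t.append(st.strip())
--         res.append('-'.join(list(filter(lambda x: x != '', t))))
--     return res
-- ===== SOURCE B (Python) =====
-- import string
--
-- _TABLE = str.maketrans({c: ' ' for c in string.punctuation})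
--
-- def filter_word(n):
--     return ['-'.join(n.translate(_TABLE).split())]
-- ===== Notes on version B (the rewrite author's own statement) =====
-- stated objective: simpler
-- what changed: Replaces the manual character-accumulation loop with explicit empty-token filtering by a translate pass (punctuation -> space) followed by the library no-arg split, which discards empty tokens itself.
import Mathlib
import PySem

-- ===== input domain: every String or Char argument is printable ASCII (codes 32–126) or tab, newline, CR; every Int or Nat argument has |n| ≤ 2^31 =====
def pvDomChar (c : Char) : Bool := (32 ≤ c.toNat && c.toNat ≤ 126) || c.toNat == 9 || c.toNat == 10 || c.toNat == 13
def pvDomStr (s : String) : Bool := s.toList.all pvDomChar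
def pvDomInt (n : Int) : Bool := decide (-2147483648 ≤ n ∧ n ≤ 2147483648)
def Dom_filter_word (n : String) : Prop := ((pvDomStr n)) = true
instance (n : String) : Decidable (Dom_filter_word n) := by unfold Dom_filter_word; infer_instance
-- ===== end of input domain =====

-- B replaces A's manual character-accumulation loop (with explicit empty-token filtering)
-- by a translate pass (punctuation -> space) followed by Python's no-arg split; simpler, same cost.


-- ===== PORT A =====
-- string.punctuation, as a list of characters
def pyPunct : List Char := "!\"#$%&'()*+,-./:;<=>?@[\\]^_`{|}~".toList

-- the body of A's inner `for j in i` loop; state = (t, st)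
def stepA (p : List (List Char) × List Char) (j : Char) : List (List Char) × List Char :=
  if pyPunct.contains j || PySem.Chars.isspace j then
    (if PySem.Chars.strIsspace (PySem.Chars.strip p.2) = false then
       p.1 ++ [PySem.Chars.strip p.2]
     else p.1, [])
  else (p.1, p.2 ++ [j])

def filter_word (n : String) : List String :=
  ([n].foldl (fun (res : List String) (i : String) =>
    let p := i.toList.foldl stepA ([], [])
    let t := p.1 ++ [PySem.Chars.strip p.2]
    res ++ [String.ofList (PySem.Chars.join ['-'] (t.filter (fun x => decide (x ≠ []))))]) [])

-- ===== PORT B =====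
-- the per-character effect of n.translate(_TABLE): punctuation becomes a space
def transB (c : Char) : Char := if pyPunct.contains c then ' ' else c

def filter_word_alt (n : String) : List String :=
  [String.ofList (PySem.Chars.join ['-'] (PySem.Chars.split₀ (n.toList.map transB)))]

-- ===== PRECONDITION & SPEC =====
def Spec_filter_word (n : String) (out : List String) : Prop := out = filter_word_alt n
instance (n : String) (out : List String) : Decidable (Spec_filter_word n out) := by unfold Spec_filter_word; infer_instance

-- ===== CLAIM (what is proved, stated in full; the proofs are below) =====
def Claim_equal_filter_word : Prop := ∀ (n : String), Dom_filter_word n → Spec_filter_word n (filter_word n)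

-- ===== LEMMAS AND PROOFS =====

-- a delimiter character for A: punctuation or whitespace
def delimC (c : Char) : Bool := pyPunct.contains c || PySem.Chars.isspace c

lemma strip_eq_self (st : List Char) (h : ∀ c ∈ st, PySem.Chars.isspace c = false) :
    PySem.Chars.strip st = st := by
  have hl : PySem.Chars.lstrip st = st := by
    cases st with
    | nil => rfl
    | cons a l =>
        simp [PySem.Chars.lstrip, List.dropWhile, h a (by simp)]
  have hr : PySem.Chars.rstrip st = st := by
    unfold PySem.Chars.rstrip
    cases hrev : st.reverse with
    | nil => simpa using congrArg List.reverse hrev.symm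
    | cons a l =>
        have ha : a ∈ st := by
          have : a ∈ st.reverse := by simp [hrev]
          simpa using this
        simp only [List.dropWhile, h a ha]
        simpa using congrArg List.reverse hrev.symm
  simp [PySem.Chars.strip, hl, hr]

lemma strIsspace_false (st : List Char) (h : ∀ c ∈ st, PySem.Chars.isspace c = false) :
    PySem.Chars.strIsspace st = false := by
  cases st with
  | nil => rfl
  | cons a l => simp [PySem.Chars.strIsspace, h a (by simp)]

lemma go_acc (s : List Char) : ∀ (cur : List Char) (acc : List (List Char)),
    PySem.Chars.split₀.go s cur acc = acc.reverse ++ PySem.Chars.split₀.go s cur [] := by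
  induction s with
  | nil =>
      intro cur acc
      rw [PySem.Chars.split₀.go.eq_1, PySem.Chars.split₀.go.eq_1]
      by_cases hc : cur.isEmpty = true
      · rw [if_pos hc, if_pos hc]; simp
      · rw [if_neg hc, if_neg hc]; simp
  | cons c rest ih =>
      intro cur acc
      rw [PySem.Chars.split₀.go.eq_2, PySem.Chars.split₀.go.eq_2]
      by_cases hs : PySem.Chars.isspace c = true
      · rw [if_pos hs, if_pos hs]
        by_cases hc : cur.isEmpty = true
        · rw [if_pos hc, if_pos hc]; exact ih [] acc
        · rw [if_neg hc, if_neg hc]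
          rw [ih [] (cur.reverse :: acc), ih [] [cur.reverse]]
          simp
      · rw [if_neg hs, if_neg hs]; exact ih (c :: cur) acc

lemma isspace_transB (c : Char) : PySem.Chars.isspace (transB c) = delimC c := by
  unfold transB delimC
  by_cases hp : pyPunct.contains c = true
  · rw [if_pos hp, hp]
    have hs : PySem.Chars.isspace ' ' = true := by decide
    rw [hs]; simp
  · rw [if_neg hp]
    rw [Bool.not_eq_true] at hp
    rw [hp]; simp

-- the main invariant: A's loop from state (t, st) — followed by the final append of
-- the stripped current word and the empty-token filter — produces exactly the kept
-- tokens of t plus split₀.go on the translated remainder with st as current word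
lemma loopA_eq (cs : List Char) : ∀ (t : List (List Char)) (st : List Char),
    (∀ c ∈ st, delimC c = false) →
    (((cs.foldl stepA (t, st)).1 ++ [PySem.Chars.strip (cs.foldl stepA (t, st)).2]).filter
        (fun x => decide (x ≠ [])))
      = t.filter (fun x => decide (x ≠ [])) ++
        PySem.Chars.split₀.go (cs.map transB) st.reverse [] := by
  induction cs with
  | nil =>
      intro t st hst
      have hsp : ∀ c ∈ st, PySem.Chars.isspace c = false := by
        intro c hc
        have h := hst c hc
        unfold delimC at h
        exact (Bool.or_eq_false_iff.mp h).2
      rw [List.foldl_nil, List.map_nil, PySem.Chars.split₀.go.eq_1]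
      show (t ++ [PySem.Chars.strip st]).filter _ = _
      rw [strip_eq_self st hsp]
      cases st with
      | nil => simp [List.filter_append]
      | cons a l =>
          rw [if_neg (by simp)]
          simp [List.filter_append]
  | cons c rest ih =>
      intro t st hst
      have hsp : ∀ c ∈ st, PySem.Chars.isspace c = false := by
        intro c hc
        have h := hst c hc
        unfold delimC at h
        exact (Bool.or_eq_false_iff.mp h).2
      by_cases hd : delimC c = true
      · -- delimiter: A flushes st, B's split₀ closes the current word
        have hd' : (pyPunct.contains c || PySem.Chars.isspace c) = true := hd
        have hstep : stepA (t, st) c = (t ++ [st], []) := by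
          unfold stepA
          rw [if_pos hd', strip_eq_self st hsp, strIsspace_false st hsp, if_pos rfl]
        have hsc : PySem.Chars.isspace (transB c) = true := by
          rw [isspace_transB]; exact hd
        rw [List.foldl_cons, hstep, ih (t ++ [st]) [] (by simp),
            List.map_cons, PySem.Chars.split₀.go.eq_2, if_pos hsc]
        cases st with
        | nil => simp [List.filter_append]
        | cons a l =>
            rw [if_neg (by simp), go_acc (rest.map transB) [] _]
            simp [List.filter_append]
      · -- ordinary character: both sides extend the current word
        have hd' : (pyPunct.contains c || PySem.Chars.isspace c) = false := by
          rw [Bool.not_eq_true] at hd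
          exact hd
        have hpc : pyPunct.contains c = false := (Bool.or_eq_false_iff.mp hd').1
        have hic : PySem.Chars.isspace c = false := (Bool.or_eq_false_iff.mp hd').2
        have hstep : stepA (t, st) c = (t, st ++ [c]) := by
          unfold stepA
          rw [if_neg (by rw [hd']; simp)]
        have hext : ∀ d ∈ st ++ [c], delimC d = false := by
          intro d hdm
          rcases List.mem_append.mp hdm with h1 | h1
          · exact hst d h1
          · simp only [List.mem_singleton] at h1
            subst h1
            unfold delimC
            rw [hd']
        have htc : transB c = c := by
          unfold transB
          rw [if_neg (by rw [hpc]; simp)]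
        rw [List.foldl_cons, hstep, ih t (st ++ [c]) hext,
            List.map_cons, htc, PySem.Chars.split₀.go.eq_2,
            if_neg (by rw [hic]; simp)]
        simp

-- ===== VERDICT (by name: the statement is the Claim_ definition above) =====
theorem filter_word_spec : Claim_equal_filter_word := by
  intro n _
  unfold Spec_filter_word filter_word filter_word_alt
  simp only [List.foldl_cons, List.foldl_nil, List.nil_append]
  have h := loopA_eq n.toList [] [] (by simp)
  simp only [List.filter_nil, List.nil_append, List.reverse_nil] at h
  rw [h]
  rfl
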